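-- pv_equiv track=rewrite | github.com/derekchen14/personal_assistants | _specs/scaffolding/backend/utilities/nlu_helpers.py | overlap_consensus
-- ===== SOURCE A (Python) =====
-- def overlap_consensus(preds):
--   # see if the different experts agree enough, returns a boolean and {dax} code
--   enough_overlap = False
--   top_dax = '000'
--
--   digit_sets = [set(pred) for pred in preds]
--   overlap = set.intersection(*digit_sets)
--   overlap.discard('0')
--
--   # if all the dax have overlap on exactly one digit, then return that digit as the top dax
--   if len(overlap) == 1:
--     enough_overlap = True
--     top_digit = overlap.pop()
--     top_dax = f'00{top_digit}'
--   return enough_overlap, top_dax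
-- ===== SOURCE B (Python) =====
-- def overlap_consensus(preds):
--   # Tally, over all predictions, how many contain each character; shared are the
--   # chars present in every prediction (excluding '0').
--   n = len(preds)
--   counts = {}
--   for pred in preds:
--     for ch in dict.fromkeys(pred):
--       counts[ch] = counts.get(ch, 0) + 1
--   shared = [ch for ch, c in counts.items() if c == n and ch != '0']
--   if len(shared) == 1:
--     return True, f'00{shared[0]}'
--   return False, '000'
-- ===== Notes on version B (the rewrite author's own statement) =====
-- stated objective: idiomatic
-- what changed: Replaces the fold of set intersections over per-prediction character sets by a single counting pass: a dict tallies how many predictions contain each character, and the shared characters are those whose tally equals len(preds).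
-- outside the precondition, e.g. on overlap_consensus([]): A raises TypeError, B returns (False, '000')
import Mathlib
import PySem

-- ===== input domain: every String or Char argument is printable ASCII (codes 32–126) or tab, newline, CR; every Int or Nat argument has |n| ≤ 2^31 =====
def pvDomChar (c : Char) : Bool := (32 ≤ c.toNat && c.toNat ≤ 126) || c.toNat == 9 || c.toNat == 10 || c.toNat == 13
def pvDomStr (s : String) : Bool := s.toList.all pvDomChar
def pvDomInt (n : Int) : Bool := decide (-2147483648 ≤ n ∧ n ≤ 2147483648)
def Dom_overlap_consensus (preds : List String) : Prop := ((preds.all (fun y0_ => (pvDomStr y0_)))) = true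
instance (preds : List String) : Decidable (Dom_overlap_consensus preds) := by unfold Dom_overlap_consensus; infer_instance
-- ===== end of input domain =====

-- B replaces the set-intersection fold by a single counting pass (tally how many
-- predictions contain each character); same return value wherever A returns.

-- ===== PORT A =====
def overlap_consensus (preds : List String) : Bool × String :=
  -- digit_sets = [set(pred) for pred in preds]; overlap = set.intersection(*digit_sets)
  match preds.map (fun p => PySem.Set.ofList p.toList) with
  | [] => (false, "000")   -- Python raises TypeError here; excluded by Pre_
  | s0 :: rest =>
    let ov : PySem.Set Char := rest.foldl (fun acc s => PySem.Set.inter acc s) s0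
    let ov := PySem.Set.discard ov '0'
    -- len(overlap) == 1 and overlap.pop(): order-independent, so matching the list is exact
    match ov with
    | [c] => (true, String.ofList ['0', '0', c])
    | _ => (false, "000")

-- ===== PORT B =====
def overlap_consensus_alt (preds : List String) : Bool × String :=
  let n := preds.length
  -- counts[ch] += 1 once per prediction containing ch (dict.fromkeys = ordered dedup)
  let counts : PySem.Dict Char Int :=
    PySem.Dict.counter (preds.flatMap (fun p => PySem.List.dedup p.toList))
  let shared := (counts.items.filter (fun kv => kv.2 == (n : Int) && kv.1 != '0')).map Prod.fst
  -- len(shared) == 1; f'00{shared[0]}' appends the single shared character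
  if shared.length = 1 then (true, String.ofList ('0' :: '0' :: shared)) else (false, "000")

-- ===== PRECONDITION & SPEC =====
-- Pre_ excludes only the empty list, on which A's set.intersection(*[]) raises TypeError.
def Pre_overlap_consensus (preds : List String) : Prop := preds ≠ []
instance (preds : List String) : Decidable (Pre_overlap_consensus preds) := by unfold Pre_overlap_consensus; infer_instance
def pvWitness_overlap_consensus : List String := ["101", "12"]

def Spec_overlap_consensus (preds : List String) (out : Bool × String) : Prop := out = overlap_consensus_alt preds
instance (preds : List String) (out : Bool × String) : Decidable (Spec_overlap_consensus preds out) := by unfold Spec_overlap_consensus; infer_instance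

-- ===== CLAIM (what is proved, stated in full; the proofs are below) =====
def Claim_equal_overlap_consensus : Prop := ∀ (preds : List String), Dom_overlap_consensus preds → Pre_overlap_consensus preds → Spec_overlap_consensus preds (overlap_consensus preds)

-- ===== LEMMAS AND PROOFS =====

-- the shared singleton-or-not test both ports end with
def pvOut (l : List Char) : Bool × String :=
  match l with
  | [c] => (true, String.ofList ['0', '0', c])
  | _ => (false, "000")

theorem pvOut_perm (LA LB : List Char) (hperm : LA.Perm LB) : pvOut LA = pvOut LB := by
  match LA with
  | [] => rw [List.Perm.nil_eq hperm]
  | [a] => rw [List.Perm.singleton_eq hperm]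
  | a :: b :: r =>
    have hlen := List.Perm.length_eq hperm
    match LB with
    | [] => simp at hlen
    | [x] => simp at hlen
    | x :: y :: s => rfl

theorem if_len_one_eq_pvOut (l : List Char) :
    (if l.length = 1 then ((true : Bool), String.ofList ('0' :: '0' :: l)) else (false, "000")) = pvOut l := by
  match l with
  | [] => rfl
  | [c] => rfl
  | a :: b :: r => simp [pvOut]

theorem foldl_inter_mem (sets : List (PySem.Set Char)) (acc : PySem.Set Char) (c : Char) :
    c ∈ sets.foldl (fun a s => PySem.Set.inter a s) acc ↔ c ∈ acc ∧ ∀ s ∈ sets, c ∈ s := by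
  induction sets generalizing acc with
  | nil => simp
  | cons s ss ih => simp [List.foldl_cons, ih, PySem.Set.mem_inter]; tauto

theorem foldl_inter_nodup (sets : List (PySem.Set Char)) (acc : PySem.Set Char) (h : acc.Nodup) :
    (sets.foldl (fun a s => PySem.Set.inter a s) acc).Nodup := by
  induction sets generalizing acc with
  | nil => exact h
  | cons s ss ih => exact ih _ (PySem.Set.nodup_inter _ _ h)

-- # of copies of c in the flattened deduplicated list = # of predictions containing c
theorem count_flat (preds : List String) (c : Char) :
    (preds.flatMap (fun p => PySem.List.dedup p.toList)).count c
      = preds.countP (fun p => decide (c ∈ p.toList)) := by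
  induction preds with
  | nil => rfl
  | cons p ps ih =>
    rw [List.flatMap_cons, List.count_append, ih, List.countP_cons]
    have hnd : (PySem.List.dedup p.toList).Nodup := PySem.List.nodup_dedup _
    by_cases h : c ∈ p.toList
    · rw [List.count_eq_one_of_mem hnd ((PySem.List.mem_dedup _ _).mpr h)]
      rw [if_pos (by simpa using h)]; omega
    · rw [List.count_eq_zero.mpr (fun hc => h ((PySem.List.mem_dedup _ _).mp hc))]
      rw [if_neg (by simpa using h)]; omega

-- B's shared list: membership characterisation (needs a nonempty list)
theorem memB (preds : List String) (h : preds ≠ []) (c : Char) :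
    c ∈ (((PySem.Dict.counter (preds.flatMap (fun p => PySem.List.dedup p.toList))).items.filter
          (fun kv => kv.2 == (preds.length : Int) && kv.1 != '0')).map Prod.fst)
      ↔ (∀ q ∈ preds, c ∈ q.toList) ∧ c ≠ '0' := by
  rw [PySem.Dict.items_counter, List.filter_map, List.map_map]
  simp only [List.mem_map, List.mem_filter, Function.comp_apply, PySem.Set.mem_ofList,
    List.mem_flatMap, PySem.List.mem_dedup, Bool.and_eq_true, beq_iff_eq, bne_iff_ne,
    Int.natCast_inj]
  constructor
  · rintro ⟨k, ⟨⟨q, hq, hk⟩, hcnt, hne⟩, rfl⟩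
    rw [count_flat] at hcnt
    refine ⟨fun q hq' => ?_, hne⟩
    have := (List.countP_eq_length (p := fun p => decide (k ∈ p.toList))).mp hcnt q hq'
    simpa using this
  · rintro ⟨hall, hne⟩
    obtain ⟨q, hq⟩ := List.exists_mem_of_ne_nil preds h
    refine ⟨c, ⟨⟨q, hq, hall q hq⟩, ?_, hne⟩, rfl⟩
    rw [count_flat]
    exact List.countP_eq_length.mpr (fun p hp => by simpa using hall p hp)

theorem nodupB (preds : List String) :
    ((((PySem.Dict.counter (preds.flatMap (fun p => PySem.List.dedup p.toList))).items.filter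
          (fun kv => kv.2 == (preds.length : Int) && kv.1 != '0')).map Prod.fst)).Nodup := by
  rw [PySem.Dict.items_counter, List.filter_map, List.map_map]
  have : (Prod.fst ∘ fun k => (k, ((preds.flatMap (fun p => PySem.List.dedup p.toList)).count k : Int))) = id := rfl
  rw [this, List.map_id]
  exact (PySem.Set.nodup_ofList _).filter _

-- ===== VERDICT (by name: the statement is the Claim_ definition above) =====
theorem overlap_consensus_spec : Claim_equal_overlap_consensus := by
  intro preds _ hpre
  unfold Spec_overlap_consensus
  match preds with
  | [] => exact absurd rfl hpre
  | p :: ps =>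
    show pvOut (PySem.Set.discard
        ((ps.map (fun q => PySem.Set.ofList q.toList)).foldl (fun acc s => PySem.Set.inter acc s)
          (PySem.Set.ofList p.toList)) '0')
      = (if (((PySem.Dict.counter ((p :: ps).flatMap (fun q => PySem.List.dedup q.toList))).items.filter
          (fun kv => kv.2 == (((p :: ps).length : Nat) : Int) && kv.1 != '0')).map Prod.fst).length = 1
         then ((true : Bool), String.ofList ('0' :: '0' ::
            (((PySem.Dict.counter ((p :: ps).flatMap (fun q => PySem.List.dedup q.toList))).items.filter
          (fun kv => kv.2 == (((p :: ps).length : Nat) : Int) && kv.1 != '0')).map Prod.fst)))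
         else (false, "000"))
    rw [if_len_one_eq_pvOut]
    apply pvOut_perm
    apply (List.perm_ext_iff_of_nodup ?_ ?_).mpr
    · intro c
      rw [memB _ (List.cons_ne_nil p ps), PySem.Set.mem_discard, foldl_inter_mem]
      simp only [PySem.Set.mem_ofList, List.mem_map, List.mem_cons]
      constructor
      · rintro ⟨⟨hp, hrest⟩, hne⟩
        refine ⟨fun q hq => ?_, hne⟩
        rcases hq with rfl | hq
        · exact hp
        · exact (PySem.Set.mem_ofList _ _).mp (hrest _ ⟨q, hq, rfl⟩)
      · rintro ⟨hall, hne⟩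
        exact ⟨⟨hall p (.inl rfl), by rintro s ⟨q, hq, rfl⟩; simpa using hall q (.inr hq)⟩, hne⟩
    · exact PySem.Set.nodup_discard _ _ (foldl_inter_nodup _ _ (PySem.Set.nodup_ofList _))
    · exact nodupB _
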